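-- pv_equiv track=rewrite | github.com/Horizon-42/fairytales_resarch | llm_model/text_segmentation/graph_segsm.py | _segments_to_boundaries
-- ===== SOURCE A (Python) =====
-- from typing import List, Set
--
-- def _segments_to_boundaries(
--
--     segments: List[List[int]],
--     n: int,
-- ) -> List[int]:
--     """Convert segments to boundary indices.
--
--     Args:
--         segments: List of segments.
--         n: Number of sentences.
--
--     Returns:
--         List of boundary indices.
--     """
--     boundaries = []
--
--     for seg in segments:
--         # Boundary is after the last sentence of each segment (except the last)
--         if seg and seg[-1] < n - 1:
--             boundaries.append(seg[-1])
--
--     # Remove duplicates and sort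
--     boundaries = sorted(set(boundaries))
--
--     return boundaries
-- ===== SOURCE B (Python) =====
-- def _ins(v, xs):
--     """Insert v into the sorted duplicate-free list xs, keeping it sorted and duplicate-free."""
--     if not xs or v < xs[0]:
--         return [v] + xs
--     if v == xs[0]:
--         return xs
--     return [xs[0]] + _ins(v, xs[1:])
--
--
-- def _segments_to_boundaries(segments, n):
--     boundaries = []
--     for seg in segments:
--         if seg and seg[-1] < n - 1:
--             boundaries = _ins(seg[-1], boundaries)
--     return boundaries
-- ===== Notes on version B (the rewrite author's own statement) =====
-- stated objective: alternative
-- what changed: B maintains a sorted duplicate-free list by ordered insertion as it scans the segments, instead of collecting all candidates and then applying set() and a comparison sort.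
import Mathlib
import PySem

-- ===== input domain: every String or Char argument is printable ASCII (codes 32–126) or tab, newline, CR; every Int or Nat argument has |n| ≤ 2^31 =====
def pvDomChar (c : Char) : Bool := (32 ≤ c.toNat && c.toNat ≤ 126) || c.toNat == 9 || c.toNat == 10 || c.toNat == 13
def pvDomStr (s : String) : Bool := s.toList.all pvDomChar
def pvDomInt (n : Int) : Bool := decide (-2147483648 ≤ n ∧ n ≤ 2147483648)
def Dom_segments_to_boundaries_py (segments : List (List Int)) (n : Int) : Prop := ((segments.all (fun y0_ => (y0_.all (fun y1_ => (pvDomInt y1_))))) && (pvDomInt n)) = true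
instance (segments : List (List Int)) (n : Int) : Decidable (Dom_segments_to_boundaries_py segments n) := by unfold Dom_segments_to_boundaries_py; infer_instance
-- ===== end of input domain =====

-- B keeps boundaries sorted and duplicate-free online by ordered insertion instead of collecting then sorted(set(...)); alternative decomposition.


-- ===== PORT A =====
-- for seg in segments: if seg and seg[-1] < n - 1: boundaries.append(seg[-1]); then sorted(set(boundaries))
def segments_to_boundaries_py (segments : List (List Int)) (n : Int) : List Int :=
  let boundaries := segments.foldl (fun acc seg =>
    if seg ≠ [] ∧ PySem.List.pyGetD seg (-1) 0 < n - 1 then acc ++ [PySem.List.pyGetD seg (-1) 0]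
    else acc) []
  PySem.List.sorted (PySem.Set.ofList boundaries) (fun x => x) false

-- ===== PORT B =====
-- _ins v xs: insert v into the sorted duplicate-free list xs, keeping it sorted and duplicate-free
def pvIns (v : Int) : List Int → List Int
  | [] => [v]
  | x :: xs => if v < x then v :: x :: xs else if v = x then x :: xs else x :: pvIns v xs

def segments_to_boundaries_py_alt (segments : List (List Int)) (n : Int) : List Int :=
  segments.foldl (fun acc seg =>
    if seg ≠ [] ∧ PySem.List.pyGetD seg (-1) 0 < n - 1 then pvIns (PySem.List.pyGetD seg (-1) 0) acc
    else acc) []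

-- ===== PRECONDITION & SPEC =====
def Spec_segments_to_boundaries_py (segments : List (List Int)) (n : Int) (out : List Int) : Prop := out = segments_to_boundaries_py_alt segments n
instance (segments : List (List Int)) (n : Int) (out : List Int) : Decidable (Spec_segments_to_boundaries_py segments n out) := by unfold Spec_segments_to_boundaries_py; infer_instance

-- ===== CLAIM (what is proved, stated in full; the proofs are below) =====
def Claim_equal_segments_to_boundaries_py : Prop := ∀ (segments : List (List Int)) (n : Int), Dom_segments_to_boundaries_py segments n → Spec_segments_to_boundaries_py segments n (segments_to_boundaries_py segments n)

-- ===== LEMMAS AND PROOFS =====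

theorem mem_pvIns (v x : Int) (xs : List Int) : x ∈ pvIns v xs ↔ x = v ∨ x ∈ xs := by
  induction xs with
  | nil => simp [pvIns]
  | cons y ys ih =>
    simp only [pvIns]
    split_ifs with h1 h2
    · simp
    · subst h2; simp
    · simp [ih]; tauto

theorem pairwise_pvIns (v : Int) (xs : List Int) (h : xs.Pairwise (· < ·)) :
    (pvIns v xs).Pairwise (· < ·) := by
  induction xs with
  | nil => simp [pvIns]
  | cons y ys ih =>
    rcases List.pairwise_cons.mp h with ⟨hy, hys⟩
    simp only [pvIns]
    split_ifs with h1 h2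
    · refine List.pairwise_cons.mpr ⟨?_, h⟩
      intro b hb
      rw [List.mem_cons] at hb
      rcases hb with rfl | hb
      · exact h1
      · exact lt_trans h1 (hy _ hb)
    · exact h
    · refine List.pairwise_cons.mpr ⟨?_, ih hys⟩
      intro b hb
      rcases (mem_pvIns v b ys).mp hb with rfl | hb
      · omega
      · exact hy _ hb

theorem pairwise_foldl_pvIns (n : Int) (segs : List (List Int)) (acc : List Int)
    (h : acc.Pairwise (· < ·)) :
    (segs.foldl (fun acc seg =>
      if seg ≠ [] ∧ PySem.List.pyGetD seg (-1) 0 < n - 1 then pvIns (PySem.List.pyGetD seg (-1) 0) acc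
      else acc) acc).Pairwise (· < ·) := by
  induction segs generalizing acc with
  | nil => exact h
  | cons s ss ih =>
    simp only [List.foldl_cons]
    split_ifs with hc
    · exact ih _ (pairwise_pvIns _ _ h)
    · exact ih _ h

theorem mem_foldl_pvIns (n : Int) (segs : List (List Int)) (acc acc' : List Int)
    (h : ∀ x, x ∈ acc ↔ x ∈ acc') :
    ∀ x, (x ∈ segs.foldl (fun acc seg =>
      if seg ≠ [] ∧ PySem.List.pyGetD seg (-1) 0 < n - 1 then pvIns (PySem.List.pyGetD seg (-1) 0) acc
      else acc) acc) ↔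
      (x ∈ segs.foldl (fun acc seg =>
      if seg ≠ [] ∧ PySem.List.pyGetD seg (-1) 0 < n - 1 then acc ++ [PySem.List.pyGetD seg (-1) 0]
      else acc) acc') := by
  induction segs generalizing acc acc' with
  | nil => exact h
  | cons s ss ih =>
    simp only [List.foldl_cons]
    split_ifs with hc
    · exact ih _ _ (fun x => by simp [mem_pvIns, h x]; tauto)
    · exact ih _ _ h

-- ===== VERDICT (by name: the statement is the Claim_ definition above) =====
theorem segments_to_boundaries_py_spec : Claim_equal_segments_to_boundaries_py := by
  intro segments n _
  unfold Spec_segments_to_boundaries_py segments_to_boundaries_py segments_to_boundaries_py_alt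
  have hpw : (segments.foldl (fun acc seg =>
      if seg ≠ [] ∧ PySem.List.pyGetD seg (-1) 0 < n - 1 then pvIns (PySem.List.pyGetD seg (-1) 0) acc
      else acc) []).Pairwise (· < ·) :=
    pairwise_foldl_pvIns n segments [] (List.Pairwise.nil)
  have hmem := mem_foldl_pvIns n segments [] [] (fun x => Iff.rfl)
  apply PySem.List.sorted_eq_of_perm_of_pairwise_lt
  · refine (List.perm_ext_iff_of_nodup (hpw.imp ne_of_lt) (PySem.Set.nodup_ofList _)).mpr ?_
    intro x
    rw [hmem x, PySem.Set.mem_ofList]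
  · exact hpw
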